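-- pv_equiv track=rewrite | github.com/asobl/lv2-parking-chicago | product/web/scripts/fetch_data.py | dedup_tm_events
-- ===== SOURCE A (Python) =====
-- def dedup_tm_events(events):
--     """Remove duplicate events on the same date.
--     Same concert is often listed under both Wrigley venue IDs with slightly different names.
--     Key on date + first two words of name (catches 'Tyler Childers - Snipe Hunt' vs 'Tyler Childers w/ Jon Batiste').
--     When there's a duplicate, keep the shorter/cleaner name (fewer hyphens and 'w/' notation).
--     """
--     seen = {}
--     for ev in events:
--         words = ev['name'].split()
--         name_key = ' '.join(words[:2]).lower().strip(' -')
--         key = (ev['date'], name_key)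
--         if key not in seen:
--             seen[key] = ev
--         else:
--             # Prefer the cleaner name: shorter, no 'w/', no ' - '
--             existing = seen[key]['name']
--             candidate = ev['name']
--             if len(candidate) < len(existing) and 'w/' not in candidate:
--                 seen[key] = ev
--     return list(seen.values())
-- ===== SOURCE B (Python) =====
-- def dedup_tm_events(events):
--     """Group events by (date, two-word name prefix) first, then reduce each group to one representative."""
--     def _key(ev):
--         return (ev['date'], ' '.join(ev['name'].split()[:2]).lower().strip(' -'))
--     groups = {}
--     for ev in events:
--         groups.setdefault(_key(ev), []).append(ev)
--     out = []
--     for grp in groups.values():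
--         best = grp[0]
--         for ev in grp[1:]:
--             if len(ev['name']) < len(best['name']) and 'w/' not in ev['name']:
--                 best = ev
--         out.append(best)
--     return out
-- ===== Notes on version B (the rewrite author's own statement) =====
-- stated objective: alternative
-- what changed: B first groups the events into an insertion-ordered dict of key -> list of events, then reduces each group with a left fold that keeps the shorter 'w/'-free name, instead of A's single pass that maintains one current representative per key in the dict.
import Mathlib
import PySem

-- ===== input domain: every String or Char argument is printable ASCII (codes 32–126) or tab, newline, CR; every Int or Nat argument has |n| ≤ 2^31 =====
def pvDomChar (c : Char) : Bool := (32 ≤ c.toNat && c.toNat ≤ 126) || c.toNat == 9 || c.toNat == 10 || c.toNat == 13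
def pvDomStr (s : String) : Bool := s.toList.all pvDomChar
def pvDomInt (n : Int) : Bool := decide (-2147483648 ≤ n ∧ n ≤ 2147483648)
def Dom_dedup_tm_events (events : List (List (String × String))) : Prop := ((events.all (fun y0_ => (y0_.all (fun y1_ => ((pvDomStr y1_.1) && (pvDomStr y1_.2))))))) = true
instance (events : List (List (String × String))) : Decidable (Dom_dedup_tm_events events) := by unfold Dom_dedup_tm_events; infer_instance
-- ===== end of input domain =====

-- B regroups the events by key first and then reduces each group with the same
-- preference fold; objective: alternative decomposition (same cost).

-- ===== PORT A =====
-- ev['k'] on the assoc-list dict: first match; "" only outside Pre_ (Python raises KeyError there)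
def pvLookup (ev : List (String × String)) (k : String) : String :=
  ((ev.find? (fun p => p.1 == k)).map (fun p => p.2)).getD ""

-- key = (ev['date'], ' '.join(ev['name'].split()[:2]).lower().strip(' -'))
def pvKey (ev : List (String × String)) : String × String :=
  (pvLookup ev "date",
   PySem.Str.stripChars
     (PySem.Str.lower
       (PySem.Str.join " " (PySem.List.slice (PySem.Str.split₀ (pvLookup ev "name")) none (some 2))))
     " -")

-- the body of A's 'for ev in events' loop
def pvAStep (seen : PySem.Dict (String × String) (List (String × String)))
    (ev : List (String × String)) : PySem.Dict (String × String) (List (String × String)) :=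
  let key := pvKey ev
  if !(seen.contains key) then seen.insert key ev
  else
    let existing := pvLookup ((seen.get? key).getD []) "name"
    let candidate := pvLookup ev "name"
    if PySem.Str.len candidate < PySem.Str.len existing && !(PySem.Str.isIn "w/" candidate)
    then seen.insert key ev else seen

def dedup_tm_events (events : List (List (String × String))) : List (List (String × String)) :=
  (events.foldl pvAStep PySem.Dict.empty).values

-- ===== PORT B =====
-- groups.setdefault(key, []).append(ev)
def pvBStep (g : PySem.Dict (String × String) (List (List (String × String))))
    (ev : List (String × String)) : PySem.Dict (String × String) (List (List (String × String))) :=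
  g.modify (pvKey ev) [] (fun l => l ++ [ev])

-- best = grp[0]; for ev in grp[1:]: replace when shorter and without 'w/'
def pvReduce (grp : List (List (String × String))) : List (String × String) :=
  match grp with
  | [] => []
  | e :: rest => rest.foldl (fun best ev =>
      if PySem.Str.len (pvLookup ev "name") < PySem.Str.len (pvLookup best "name")
         && !(PySem.Str.isIn "w/" (pvLookup ev "name")) then ev else best) e

def dedup_tm_events_alt (events : List (List (String × String))) : List (List (String × String)) :=
  ((events.foldl pvBStep PySem.Dict.empty).values).map pvReduce

-- ===== PRECONDITION & SPEC =====
-- Pre_ excludes exactly the events missing a 'name' or 'date' key, on which Python's A raises KeyError.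
def Pre_dedup_tm_events (events : List (List (String × String))) : Prop :=
  (events.all (fun ev => ev.any (fun p => p.1 == "name") && ev.any (fun p => p.1 == "date"))) = true

instance (events : List (List (String × String))) : Decidable (Pre_dedup_tm_events events) := by
  unfold Pre_dedup_tm_events; infer_instance

def pvWitness_dedup_tm_events : (List (List (String × String))) :=
  [[("name", "Tyler Childers - Snipe Hunt"), ("date", "2025-08-01")],
   [("name", "Tyler Childers w/ Jon Batiste"), ("date", "2025-08-01")]]

def Spec_dedup_tm_events (events : List (List (String × String))) (out : List (List (String × String))) : Prop := out = dedup_tm_events_alt events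
instance (events : List (List (String × String))) (out : List (List (String × String))) : Decidable (Spec_dedup_tm_events events out) := by unfold Spec_dedup_tm_events; infer_instance

-- ===== CLAIM (what is proved, stated in full; the proofs are below) =====
def Claim_equal_dedup_tm_events : Prop := ∀ (events : List (List (String × String))), Dom_dedup_tm_events events → Pre_dedup_tm_events events → Spec_dedup_tm_events events (dedup_tm_events events)

-- ===== LEMMAS AND PROOFS =====

-- value map relating A's dict of representatives to B's dict of groups
def pvF (p : (String × String) × List (List (String × String))) :
    (String × String) × List (String × String) :=
  (p.1, pvReduce p.2)

theorem pvReduce_append_singleton (e : List (String × String))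
    (rest : List (List (String × String))) (ev : List (String × String)) :
    pvReduce ((e :: rest) ++ [ev]) =
      (if PySem.Str.len (pvLookup ev "name") < PySem.Str.len (pvLookup (pvReduce (e :: rest)) "name")
          && !(PySem.Str.isIn "w/" (pvLookup ev "name")) then ev else pvReduce (e :: rest)) := by
  simp [pvReduce, List.foldl_append]

theorem pv_inv (events : List (List (String × String)))
    (g : PySem.Dict (String × String) (List (List (String × String))))
    (seen : PySem.Dict (String × String) (List (String × String)))
    (hitems : seen.items = g.items.map pvF)
    (hnd : (g.items.map Prod.fst).Nodup)
    (hne : ∀ p ∈ g.items, p.2 ≠ []) :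
    (events.foldl pvAStep seen).items = ((events.foldl pvBStep g).items).map pvF := by
  induction events generalizing g seen with
  | nil => simpa using hitems
  | cons ev evs ih =>
    have hcomp : ((fun p => p.1 == pvKey ev) ∘ pvF) =
        (fun p : (String × String) × List (List (String × String)) => p.1 == pvKey ev) := rfl
    have hcontains : seen.contains (pvKey ev) = g.contains (pvKey ev) := by
      simp only [PySem.Dict.contains, hitems, List.any_map, hcomp]
    by_cases hc : g.contains (pvKey ev) = true
    · -- key already present
      have hfind' : (List.find? (fun p => p.1 == pvKey ev) g.items).isSome := by
        rw [List.find?_isSome]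
        simpa [PySem.Dict.contains, List.any_eq_true] using hc
      obtain ⟨p0, hfind⟩ := Option.isSome_iff_exists.mp hfind'
      have hp0mem : p0 ∈ g.items := List.mem_of_find?_eq_some hfind
      have hp0key : p0.1 = pvKey ev := by
        have := List.find?_some hfind; exact eq_of_beq this
      have hgget : g.get? (pvKey ev) = some p0.2 := by
        simp [PySem.Dict.get?, hfind]
      have hsget : seen.get? (pvKey ev) = some (pvReduce p0.2) := by
        simp only [PySem.Dict.get?, hitems, List.find?_map, hcomp, hfind, Option.map_some]
        rfl
      obtain ⟨e, rest, hg0⟩ : ∃ e rest, p0.2 = e :: rest := by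
        cases h : p0.2 with
        | nil => exact absurd h (hne p0 hp0mem)
        | cons e rest => exact ⟨e, rest, rfl⟩
      -- the unique entry with this key is p0
      have huniq : ∀ p ∈ g.items, p.1 = pvKey ev → p = p0 := by
        intro p hp hpk
        have hinj := List.inj_on_of_nodup_map hnd
        exact hinj hp hp0mem (by rw [hpk, hp0key])
      -- B's new items
      have hBitems : (pvBStep g ev).items =
          g.items.map (fun p => if (p.1 == pvKey ev) = true then (pvKey ev, p0.2 ++ [ev]) else p) := by
        simp only [pvBStep, PySem.Dict.modify]
        rw [PySem.Dict.items_insert_of_contains _ _ hc]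
        simp [PySem.Dict.getD_eq_get?_getD, hgget]
      set cond := (PySem.Str.len (pvLookup ev "name") < PySem.Str.len (pvLookup (pvReduce p0.2) "name")
          && !(PySem.Str.isIn "w/" (pvLookup ev "name"))) with hcond
      have hred : pvReduce (p0.2 ++ [ev]) = if cond then ev else pvReduce p0.2 := by
        rw [hg0] at hcond ⊢; rw [pvReduce_append_singleton]; rw [hcond]
      have hAstep : pvAStep seen ev = if cond then seen.insert (pvKey ev) ev else seen := by
        simp only [pvAStep, hcontains, hc]
        simp [hsget, hcond]
      have hseenc : seen.contains (pvKey ev) = true := by rw [hcontains]; exact hc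
      apply ih
      · rw [hBitems, hAstep]
        by_cases hcd : cond = true
        · rw [hcd]; simp only [if_true]
          rw [PySem.Dict.items_insert_of_contains _ _ hseenc, hitems]
          rw [List.map_map, List.map_map]
          apply List.map_congr_left
          intro p hp
          by_cases hpk : p.1 = pvKey ev
          · rw [huniq p hp hpk]
            simp [pvF, Function.comp, hp0key, hred, hcd]
          · simp [pvF, Function.comp, hpk]
        · have hcd' : cond = false := by simpa using hcd
          rw [hcd']; simp only [Bool.false_eq_true, if_false]
          rw [hitems, List.map_map]
          apply List.map_congr_left
          intro p hp
          by_cases hpk : p.1 = pvKey ev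
          · rw [huniq p hp hpk]
            simp [pvF, Function.comp, hp0key, hred, hcd']
          · simp [pvF, Function.comp, hpk]
      · rw [hBitems, List.map_map]
        have : (Prod.fst ∘ fun p => if (p.1 == pvKey ev) = true then (pvKey ev, p0.2 ++ [ev]) else p)
            = (Prod.fst : ((String × String) × List (List (String × String))) → _) := by
          funext p; by_cases hpk : p.1 = pvKey ev
          · simp [hpk]
          · simp [hpk]
        rw [this]; exact hnd
      · intro p hp
        rw [hBitems] at hp
        rcases List.mem_map.mp hp with ⟨q, hq, hqe⟩
        by_cases hqk : (q.1 == pvKey ev) = true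
        · simp only [hqk, if_true] at hqe; rw [← hqe]; simp [hg0]
        · simp only [hqk, Bool.false_eq_true, if_false] at hqe; rw [← hqe]; exact hne q hq
    · -- fresh key
      have hc' : g.contains (pvKey ev) = false := by simpa using hc
      have hseenc : seen.contains (pvKey ev) = false := by rw [hcontains]; exact hc'
      have hAstep : pvAStep seen ev = seen.insert (pvKey ev) ev := by
        simp [pvAStep, hseenc]
      have hanyf : (g.items.any fun p => p.1 == pvKey ev) = false := hc'
      have hfnone : List.find? (fun p => p.1 == pvKey ev) g.items = none := by
        rw [List.find?_eq_none]
        intro x hx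
        simpa using List.any_eq_false.mp hanyf x hx
      have hgget : g.getD (pvKey ev) [] = [] := by
        simp [PySem.Dict.getD_eq_get?_getD, PySem.Dict.get?, hfnone]
      have hBitems : (pvBStep g ev).items = g.items ++ [(pvKey ev, [ev])] := by
        simp only [pvBStep, PySem.Dict.modify, hgget]
        exact PySem.Dict.items_insert_of_not_contains _ _ hc'
      apply ih
      · rw [hAstep, PySem.Dict.items_insert_of_not_contains _ _ hseenc, hBitems, hitems]
        simp [pvF, pvReduce]
      · rw [hBitems]
        simp only [List.map_append, List.map_cons, List.map_nil]
        rw [List.nodup_append]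
        refine ⟨hnd, List.nodup_singleton _, fun a ha b hb hab => ?_⟩
        rcases List.mem_map.mp ha with ⟨q, hq, hqe⟩
        have hqk : q.1 ≠ pvKey ev := by simpa using List.any_eq_false.mp hanyf q hq
        rw [List.mem_singleton] at hb
        exact hqk (by rw [hqe, hab, hb])
      · intro p hp
        rw [hBitems] at hp
        rcases List.mem_append.mp hp with h | h
        · exact hne p h
        · simp only [List.mem_singleton] at h; rw [h]; simp

-- ===== VERDICT (by name: the statement is the Claim_ definition above) =====
theorem dedup_tm_events_spec : Claim_equal_dedup_tm_events := by
  intro events _ _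
  unfold Spec_dedup_tm_events dedup_tm_events dedup_tm_events_alt
  have h := pv_inv events PySem.Dict.empty PySem.Dict.empty (by rfl) (by simp [PySem.Dict.empty]) (by simp [PySem.Dict.empty])
  simp [PySem.Dict.values, h, pvF]
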